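-- pv_equiv track=rewrite | github.com/YaronKoresh/definers | src/definers/ml.py | is_huggingface_repo
-- ===== SOURCE A (Python) =====
-- def is_huggingface_repo(repo_id: str) -> bool:
--
--     if not isinstance(repo_id, str) or not repo_id:
--         return False
--     repo_id = repo_id.strip()
--     if "/" not in repo_id:
--         return False
--     user, name = repo_id.split("/", 1)
--     if not user or not name:
--         return False
--     allowed_chars = set(
--         "abcdefghijklmnopqrstuvwxyzABCDEFGHIJKLMNOPQRSTUVWXYZ0123456789._-"
--     )
--     return all(c in allowed_chars for c in user) and all(
--         c in allowed_chars for c in name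
--     )
-- ===== SOURCE B (Python) =====
-- import re
--
-- _REPO_ID_RE = re.compile(r'[A-Za-z0-9._\-]+/[A-Za-z0-9._\-]+')
--
-- def is_huggingface_repo(repo_id: str) -> bool:
--     if not isinstance(repo_id, str) or not repo_id:
--         return False
--     return _REPO_ID_RE.fullmatch(repo_id.strip()) is not None
-- ===== Notes on version B (the rewrite author's own statement) =====
-- stated objective: idiomatic
-- what changed: Replaced the split-on-'/' plus two per-side all(c in allowed_chars) scans with a single precompiled re.fullmatch of the stripped string against [A-Za-z0-9._-]+/[A-Za-z0-9._-]+ (one-pass state-machine match).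
import Mathlib
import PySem

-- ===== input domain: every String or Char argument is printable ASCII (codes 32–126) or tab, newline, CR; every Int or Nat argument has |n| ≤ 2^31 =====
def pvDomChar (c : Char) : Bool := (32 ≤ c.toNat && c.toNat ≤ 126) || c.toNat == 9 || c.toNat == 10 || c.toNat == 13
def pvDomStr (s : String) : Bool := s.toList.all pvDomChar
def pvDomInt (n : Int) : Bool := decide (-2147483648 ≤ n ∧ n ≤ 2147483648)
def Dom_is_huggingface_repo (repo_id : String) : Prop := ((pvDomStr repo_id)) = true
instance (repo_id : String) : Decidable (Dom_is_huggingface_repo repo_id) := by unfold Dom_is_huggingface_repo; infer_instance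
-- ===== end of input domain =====

-- B replaces A's split-then-two-scans check by one regex-style single-pass match of the
-- stripped string against [A-Za-z0-9._-]+/[A-Za-z0-9._-]+ (more idiomatic; same results).

-- ===== PORT A =====
def is_huggingface_repo (repo_id : String) : Bool :=
  -- `not isinstance(...)` is always false for a str argument; `not repo_id` is the empty check
  if repo_id.toList.isEmpty then false
  else
    let r := PySem.Str.strip repo_id
    if !(PySem.Str.isIn "/" r) then false
    else
      -- `user, name = r.split("/", 1)`: the separator is present, so exactly two parts
      match PySem.Str.splitMax? r "/" 1 with
      | some (user :: name :: _) =>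
        if user.toList.isEmpty || name.toList.isEmpty then false
        else
          let allowed := PySem.Set.ofList
            "abcdefghijklmnopqrstuvwxyzABCDEFGHIJKLMNOPQRSTUVWXYZ0123456789._-".toList
          (user.toList.all fun c => PySem.Set.contains allowed c) &&
          (name.toList.all fun c => PySem.Set.contains allowed c)
      | _ => false   -- unreachable: split on a present separator yields two parts

-- ===== PORT B =====
-- hand port of re.fullmatch(r'[A-Za-z0-9._\-]+/[A-Za-z0-9._\-]+', ·): exact for this regex.
-- character class [A-Za-z0-9._-] by its code-point ranges
def pvIsAllowed (c : Char) : Bool :=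
  (97 ≤ c.toNat && c.toNat ≤ 122) || (65 ≤ c.toNat && c.toNat ≤ 90) ||
  (48 ≤ c.toNat && c.toNat ≤ 57) || c.toNat == 46 || c.toNat == 95 || c.toNat == 45

-- the regex's DFA: 0 = start, 1 = inside first run, 2 = just after '/', 3 = inside second run (accepting)
def pvMatchDFA : List Char → Nat → Bool
  | [], s => s == 3
  | c :: cs, 0 => if pvIsAllowed c then pvMatchDFA cs 1 else false
  | c :: cs, 1 => if pvIsAllowed c then pvMatchDFA cs 1 else if c == '/' then pvMatchDFA cs 2 else false
  | c :: cs, 2 => if pvIsAllowed c then pvMatchDFA cs 3 else false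
  | c :: cs, _ => if pvIsAllowed c then pvMatchDFA cs 3 else false

def is_huggingface_repo_alt (repo_id : String) : Bool :=
  if repo_id.toList.isEmpty then false
  else pvMatchDFA (PySem.Str.strip repo_id).toList 0

-- ===== PRECONDITION & SPEC =====
def Spec_is_huggingface_repo (repo_id : String) (out : Bool) : Prop := out = is_huggingface_repo_alt repo_id
instance (repo_id : String) (out : Bool) : Decidable (Spec_is_huggingface_repo repo_id out) := by unfold Spec_is_huggingface_repo; infer_instance

-- ===== CLAIM (what is proved, stated in full; the proofs are below) =====
def Claim_equal_is_huggingface_repo : Prop := ∀ (repo_id : String), Dom_is_huggingface_repo repo_id → Spec_is_huggingface_repo repo_id (is_huggingface_repo repo_id)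

-- ===== LEMMAS AND PROOFS =====

theorem pv_char_toNat_inj {a b : Char} (h : a.toNat = b.toNat) : a = b :=
  Char.ext (UInt32.toNat_inj.mp h)

theorem pv_mem_allowed_iff (c : Char) :
    c ∈ "abcdefghijklmnopqrstuvwxyzABCDEFGHIJKLMNOPQRSTUVWXYZ0123456789._-".toList ↔
    pvIsAllowed c = true := by
  have hmap : c ∈ "abcdefghijklmnopqrstuvwxyzABCDEFGHIJKLMNOPQRSTUVWXYZ0123456789._-".toList ↔
      c.toNat ∈ "abcdefghijklmnopqrstuvwxyzABCDEFGHIJKLMNOPQRSTUVWXYZ0123456789._-".toList.map Char.toNat := by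
    constructor
    · exact fun h => List.mem_map_of_mem h
    · intro h
      obtain ⟨a, ha, he⟩ := List.mem_map.mp h
      exact (pv_char_toNat_inj he) ▸ ha
  rw [hmap]
  have he : "abcdefghijklmnopqrstuvwxyzABCDEFGHIJKLMNOPQRSTUVWXYZ0123456789._-".toList.map Char.toNat =
      [97,98,99,100,101,102,103,104,105,106,107,108,109,110,111,112,113,114,115,116,117,118,119,120,121,122,65,66,67,68,69,70,71,72,73,74,75,76,77,78,79,80,81,82,83,84,85,86,87,88,89,90,48,49,50,51,52,53,54,55,56,57,46,95,45] := by decide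
  rw [he]
  simp [pvIsAllowed, List.mem_cons]
  omega

theorem pv_contains_allowed (c : Char) :
    PySem.Set.contains (PySem.Set.ofList
      "abcdefghijklmnopqrstuvwxyzABCDEFGHIJKLMNOPQRSTUVWXYZ0123456789._-".toList) c
    = pvIsAllowed c := by
  rcases hb : pvIsAllowed c with _ | _
  · rw [← Bool.not_eq_true, PySem.Set.contains_iff, PySem.Set.mem_ofList, pv_mem_allowed_iff, hb]
    simp
  · rw [PySem.Set.contains_iff, PySem.Set.mem_ofList, pv_mem_allowed_iff, hb]

theorem pv_isIn_slash (cs : List Char) : PySem.Chars.isIn ['/'] cs = true ↔ '/' ∈ cs := by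
  rw [PySem.Chars.isIn_iff_infix]
  constructor
  · exact fun h => h.subset (by simp)
  · intro h
    obtain ⟨s, t, rfl⟩ := List.append_of_mem h
    exact ⟨s, t, by simp⟩

theorem pv_exists_first_slash (cs : List Char) (h : '/' ∈ cs) :
    ∃ u v, cs = u ++ '/' :: v ∧ '/' ∉ u := by
  induction cs with
  | nil => cases h
  | cons c rest ih =>
    by_cases hc : c = '/'
    · exact ⟨[], rest, by simp [hc], by simp⟩
    · have h' : '/' ∈ rest := by
        rcases List.mem_cons.mp h with h'' | h''
        · exact absurd h''.symm hc
        · exact h''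
      obtain ⟨u, v, he, hu⟩ := ih h'
      refine ⟨c :: u, v, by simp [he], ?_⟩
      simp only [List.mem_cons, not_or]
      exact ⟨fun e => hc e.symm, hu⟩

theorem pv_go_zero (fuel : Nat) (v cur : List Char) (acc : List (List Char)) :
    PySem.Chars.splitOnMax.go ['/'] fuel 0 v cur acc = ((cur.reverse ++ v) :: acc).reverse := by
  cases fuel with
  | zero => simp [PySem.Chars.splitOnMax.go]
  | succ f => cases v <;> simp [PySem.Chars.splitOnMax.go]

theorem pv_go_one (u : List Char) : ∀ (fuel : Nat) (v cur : List Char) (acc : List (List Char)),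
    '/' ∉ u → u.length + 1 ≤ fuel →
    PySem.Chars.splitOnMax.go ['/'] fuel 1 (u ++ '/' :: v) cur acc
      = acc.reverse ++ [cur.reverse ++ u, v] := by
  induction u with
  | nil =>
    intro fuel v cur acc _ hf
    cases fuel with
    | zero => omega
    | succ f =>
      simp only [List.nil_append, PySem.Chars.splitOnMax.go]
      rw [if_neg (by omega), if_pos (by simp [List.isPrefixOf])]
      simp [pv_go_zero]
  | cons c u' ih =>
    intro fuel v cur acc hu hf
    cases fuel with
    | zero => omega
    | succ f =>
      have hc : c ≠ '/' := fun e => hu (by simp [e])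
      simp only [List.cons_append, PySem.Chars.splitOnMax.go]
      rw [if_neg (by omega), if_neg (by simp [List.isPrefixOf, Ne.symm hc])]
      rw [ih f v (c :: cur) acc (fun h => hu (by simp [h])) (by simp at hf ⊢; omega)]
      simp

theorem pv_splitOnMax_first (u v : List Char) (hu : '/' ∉ u) :
    PySem.Chars.splitOnMax (u ++ '/' :: v) ['/'] 1 = [u, v] := by
  unfold PySem.Chars.splitOnMax
  rw [if_neg (by omega)]
  rw [show ((1 : Int).toNat) = 1 from rfl,
    pv_go_one u ((u ++ '/' :: v).length + 1) v [] [] hu (by simp)]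
  simp

theorem pv_dfa3 (v : List Char) : pvMatchDFA v 3 = v.all pvIsAllowed := by
  induction v with
  | nil => rfl
  | cons c cs ih => by_cases h : pvIsAllowed c <;> simp [pvMatchDFA, h, ih]

theorem pv_dfa2 (v : List Char) : pvMatchDFA v 2 = (!v.isEmpty && v.all pvIsAllowed) := by
  cases v with
  | nil => rfl
  | cons c cs => by_cases h : pvIsAllowed c <;> simp [pvMatchDFA, h, pv_dfa3]

theorem pv_dfa1_noslash (v : List Char) (hv : '/' ∉ v) : pvMatchDFA v 1 = false := by
  induction v with
  | nil => rfl
  | cons c cs ih =>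
    have hc : c ≠ '/' := fun e => hv (by simp [e])
    by_cases h : pvIsAllowed c <;>
      simp [pvMatchDFA, h, hc, ih (fun m => hv (by simp [m]))]

theorem pv_dfa1_slash (u : List Char) : ∀ (v : List Char), '/' ∉ u →
    pvMatchDFA (u ++ '/' :: v) 1 = (u.all pvIsAllowed && pvMatchDFA v 2) := by
  induction u with
  | nil =>
    intro v _
    have hsl : ¬ (pvIsAllowed '/' = true) := by decide
    simp [pvMatchDFA, hsl]
  | cons c u' ih =>
    intro v hu
    have hc : c ≠ '/' := fun e => hu (by simp [e])
    by_cases h : pvIsAllowed c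
    · simp [pvMatchDFA, h, ih v (fun m => hu (by simp [m]))]
    · simp [pvMatchDFA, h, hc]

theorem pv_dfa0_noslash (v : List Char) (hv : '/' ∉ v) : pvMatchDFA v 0 = false := by
  cases v with
  | nil => rfl
  | cons c cs =>
    by_cases h : pvIsAllowed c <;>
      simp [pvMatchDFA, h, pv_dfa1_noslash cs (fun m => hv (by simp [m]))]

-- ===== VERDICT (by name: the statement is the Claim_ definition above) =====
theorem is_huggingface_repo_spec : Claim_equal_is_huggingface_repo := by
  intro repo_id _
  unfold Spec_is_huggingface_repo is_huggingface_repo is_huggingface_repo_alt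
  by_cases h0 : repo_id.toList.isEmpty = true
  · simp [h0]
  · rw [Bool.not_eq_true] at h0
    rw [h0]
    simp only [Bool.false_eq_true, if_false]
    set cs := (PySem.Str.strip repo_id).toList with hcs
    by_cases hs : '/' ∈ cs
    · obtain ⟨u, v, he, hu⟩ := pv_exists_first_slash cs hs
      have hin : PySem.Str.isIn "/" (PySem.Str.strip repo_id) = true := by
        simp only [PySem.Str.isIn]
        rw [show ("/".toList) = ['/'] from rfl, ← hcs]
        exact (pv_isIn_slash cs).mpr hs
      have hsplit : PySem.Str.splitMax? (PySem.Str.strip repo_id) "/" 1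
          = some [String.ofList u, String.ofList v] := by
        simp only [PySem.Str.splitMax?, PySem.Chars.splitMax?]
        rw [if_neg (by decide)]
        rw [show ("/".toList) = ['/'] from rfl, ← hcs, he, pv_splitOnMax_first u v hu]
        rfl
      rw [hin, hsplit]
      simp only [Bool.not_true, Bool.false_eq_true, if_false, String.toList_ofList]
      rw [he]
      cases u with
      | nil =>
        have hsl : ¬ (pvIsAllowed '/' = true) := by decide
        simp [pvMatchDFA, hsl]
      | cons c u' =>
        simp only [List.cons_append, pvMatchDFA, pv_contains_allowed]
        by_cases h : pvIsAllowed c = true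
        · rw [if_pos h, pv_dfa1_slash u' v (fun m => hu (by simp [m])), pv_dfa2]
          cases hv : v.isEmpty
          · simp [h]
          · simp
        · rw [if_neg h]
          simp [h]
    · have hin : PySem.Str.isIn "/" (PySem.Str.strip repo_id) = false := by
        simp only [PySem.Str.isIn]
        rw [show ("/".toList) = ['/'] from rfl, ← hcs]
        rw [← Bool.not_eq_true]
        exact fun h => hs ((pv_isIn_slash cs).mp h)
      rw [hin]
      simp [pv_dfa0_noslash cs hs]
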